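-- pv_equiv track=rewrite | github.com/reiscaslureis/hacker-rank | hacker-rank-python/ginorts.py | create_lists_and_sort
-- ===== SOURCE A (Python) =====
-- def create_lists_and_sort(s):
--     lower = []
--     upper = []
--     odds = []
--     evens = []
--     numbers = ['1', '2', '3', '4', '5', '6', '7', '8', '9', '0']
--
--     for i in range(len(s)):
--         if s[i].islower() == True:
--             lower.append(s[i])
--         elif s[i].isupper() == True:
--             upper.append(s[i])
--         elif s[i] in numbers:
--             if int(s[i]) % 2 == 0:
--                 evens.append(s[i])
--             else: odds.append(s[i])
--
--     lower = sorted(lower)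
--     upper = sorted(upper)
--     odds = sorted(odds)
--     evens = sorted(evens)
--
--     return lower, upper, odds, evens
-- ===== SOURCE B (Python) =====
-- def create_lists_and_sort(s):
--     digits = '1234567890'
--     ordered = sorted(s)
--     lower = [c for c in ordered if c.islower()]
--     upper = [c for c in ordered if not c.islower() and c.isupper()]
--     odds = [c for c in ordered
--             if not c.islower() and not c.isupper() and c in digits
--             and int(c) % 2 != 0]
--     evens = [c for c in ordered
--              if not c.islower() and not c.isupper() and c in digits
--              and int(c) % 2 == 0]
--     return lower, upper, odds, evens
-- ===== Notes on version B (the rewrite author's own statement) =====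
-- stated objective: alternative
-- what changed: B sorts the whole string once and then produces each bucket as a filter comprehension over the already-ordered characters, instead of A's single classifying loop with four accumulators followed by four separate sorts.
import Mathlib
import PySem

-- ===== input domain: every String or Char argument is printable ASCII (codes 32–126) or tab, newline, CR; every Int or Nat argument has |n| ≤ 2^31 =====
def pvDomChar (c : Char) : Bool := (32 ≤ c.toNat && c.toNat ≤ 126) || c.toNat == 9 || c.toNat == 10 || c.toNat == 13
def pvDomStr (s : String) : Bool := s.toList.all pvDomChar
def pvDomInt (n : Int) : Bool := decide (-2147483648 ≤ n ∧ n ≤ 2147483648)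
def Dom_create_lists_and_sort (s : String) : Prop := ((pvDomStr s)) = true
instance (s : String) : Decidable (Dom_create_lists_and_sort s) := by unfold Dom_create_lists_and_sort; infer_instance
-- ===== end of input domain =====

-- B sorts the string once and produces each bucket as a filter over the ordered
-- characters, instead of A's classifying loop with four accumulators plus four sorts
-- (objective: alternative).

-- ===== PORT A =====
-- A: index loop over range(len(s)); islower / isupper / membership-in-digit-list chain
-- appending to four accumulators; each bucket sorted at the end.  int(s[i]) is ported as
-- ofChars? [c] with getD 0 — the enclosing branch guarantees c is a digit, so ofChars?
-- never returns none there (exact).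
def create_lists_and_sort (s : String) : List String × List String × List String × List String :=
  let cs := s.toList
  let numbers : List Char := ['1', '2', '3', '4', '5', '6', '7', '8', '9', '0']
  let r := (PySem.List.pyRange 0 (PySem.List.len cs)).foldl
    (fun (acc : List String × List String × List String × List String) i =>
      let c := PySem.List.pyGetD cs i ' '   -- s[i]; i ∈ range(len(s)) is always in range
      if PySem.Chars.islower c then
        (acc.1 ++ [String.ofList [c]], acc.2.1, acc.2.2.1, acc.2.2.2)
      else if PySem.Chars.isupper c then
        (acc.1, acc.2.1 ++ [String.ofList [c]], acc.2.2.1, acc.2.2.2)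
      else if c ∈ numbers then
        (if PySem.Int.mod ((PySem.Int.ofChars? [c]).getD 0) 2 == 0 then
          (acc.1, acc.2.1, acc.2.2.1, acc.2.2.2 ++ [String.ofList [c]])
        else
          (acc.1, acc.2.1, acc.2.2.1 ++ [String.ofList [c]], acc.2.2.2))
      else acc)
    ([], [], [], [])
  (PySem.List.sorted r.1 (fun x => x) false, PySem.List.sorted r.2.1 (fun x => x) false,
   PySem.List.sorted r.2.2.1 (fun x => x) false, PySem.List.sorted r.2.2.2 (fun x => x) false)

-- ===== PORT B =====
-- B: sorted(s) once; each bucket is a filter comprehension over the ordered characters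
-- (c in digits ported as list membership — exact for single characters).
def create_lists_and_sort_alt (s : String) : List String × List String × List String × List String :=
  let digits : List Char := ['1', '2', '3', '4', '5', '6', '7', '8', '9', '0']
  let ordered := PySem.List.sorted s.toList (fun x => x) false
  let lower := (ordered.filter (fun c => PySem.Chars.islower c)).map (fun c => String.ofList [c])
  let upper := (ordered.filter (fun c => !PySem.Chars.islower c && PySem.Chars.isupper c)).map
    (fun c => String.ofList [c])
  let odds := (ordered.filter (fun c => !PySem.Chars.islower c && !PySem.Chars.isupper c &&
      decide (c ∈ digits) && !(PySem.Int.mod ((PySem.Int.ofChars? [c]).getD 0) 2 == 0))).map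
    (fun c => String.ofList [c])
  let evens := (ordered.filter (fun c => !PySem.Chars.islower c && !PySem.Chars.isupper c &&
      decide (c ∈ digits) && (PySem.Int.mod ((PySem.Int.ofChars? [c]).getD 0) 2 == 0))).map
    (fun c => String.ofList [c])
  (lower, upper, odds, evens)

-- ===== PRECONDITION & SPEC =====
def Spec_create_lists_and_sort (s : String) (out : List String × List String × List String × List String) : Prop := out = create_lists_and_sort_alt s
instance (s : String) (out : List String × List String × List String × List String) : Decidable (Spec_create_lists_and_sort s out) := by unfold Spec_create_lists_and_sort; infer_instance

-- ===== CLAIM (what is proved, stated in full; the proofs are below) =====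
def Claim_equal_create_lists_and_sort : Prop := ∀ (s : String), Dom_create_lists_and_sort s → Spec_create_lists_and_sort s (create_lists_and_sort s)

-- ===== LEMMAS AND PROOFS =====

-- A's per-character step (proof-side name only)
def pvStep (numbers : List Char)
    (acc : List String × List String × List String × List String) (c : Char) :
    List String × List String × List String × List String :=
  if PySem.Chars.islower c then
    (acc.1 ++ [String.ofList [c]], acc.2.1, acc.2.2.1, acc.2.2.2)
  else if PySem.Chars.isupper c then
    (acc.1, acc.2.1 ++ [String.ofList [c]], acc.2.2.1, acc.2.2.2)
  else if c ∈ numbers then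
    (if PySem.Int.mod ((PySem.Int.ofChars? [c]).getD 0) 2 == 0 then
      (acc.1, acc.2.1, acc.2.2.1, acc.2.2.2 ++ [String.ofList [c]])
    else
      (acc.1, acc.2.1, acc.2.2.1 ++ [String.ofList [c]], acc.2.2.2))
  else acc

def pvNums : List Char := ['1', '2', '3', '4', '5', '6', '7', '8', '9', '0']

def pvIsLow (c : Char) : Bool := PySem.Chars.islower c
def pvIsUp (c : Char) : Bool := !PySem.Chars.islower c && PySem.Chars.isupper c
def pvIsOdd (c : Char) : Bool :=
  !PySem.Chars.islower c && !PySem.Chars.isupper c && decide (c ∈ pvNums) &&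
    !(PySem.Int.mod ((PySem.Int.ofChars? [c]).getD 0) 2 == 0)
def pvIsEven (c : Char) : Bool :=
  !PySem.Chars.islower c && !PySem.Chars.isupper c && decide (c ∈ pvNums) &&
    (PySem.Int.mod ((PySem.Int.ofChars? [c]).getD 0) 2 == 0)

def pvToStr (c : Char) : String := String.ofList [c]

-- A's classify loop appends each element to exactly one bucket
theorem pvStep_foldl (l : List Char) (a b c d : List String) :
    l.foldl (pvStep pvNums) (a, b, c, d) =
      (a ++ (l.filter pvIsLow).map pvToStr, b ++ (l.filter pvIsUp).map pvToStr,
       c ++ (l.filter pvIsOdd).map pvToStr, d ++ (l.filter pvIsEven).map pvToStr) := by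
  induction l generalizing a b c d with
  | nil => simp
  | cons x t ih =>
    simp only [List.foldl_cons, List.filter_cons]
    cases hl : PySem.Chars.islower x with
    | true =>
      simp only [pvStep, pvIsLow, pvIsUp, pvIsOdd, pvIsEven, hl, ih]
      simp [pvToStr]
    | false =>
      cases hu : PySem.Chars.isupper x with
      | true =>
        simp only [pvStep, pvIsLow, pvIsUp, pvIsOdd, pvIsEven, hl, hu, ih]
        simp [pvToStr]
      | false =>
        by_cases h3 : x ∈ pvNums
        · cases he : (PySem.Int.mod ((PySem.Int.ofChars? [x]).getD 0) 2 == 0) with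
          | true =>
            simp only [pvStep, pvIsLow, pvIsUp, pvIsOdd, pvIsEven, hl, hu, he, if_pos h3,
              decide_eq_true h3, ih]
            simp [pvToStr]
          | false =>
            simp only [pvStep, pvIsLow, pvIsUp, pvIsOdd, pvIsEven, hl, hu, he, if_pos h3,
              decide_eq_true h3, ih]
            simp [pvToStr]
        · simp only [pvStep, pvIsLow, pvIsUp, pvIsOdd, pvIsEven, hl, hu, if_neg h3,
            decide_eq_false h3, ih]
          simp

theorem pvToStr_mono (a b : Char) (h : a ≤ b) : pvToStr a ≤ pvToStr b := by
  unfold pvToStr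
  rw [String.le_iff_toList_le]
  refine Std.not_lt.mp ?_
  intro hlt
  rw [show (String.ofList [b]).toList = [b] by simp, show (String.ofList [a]).toList = [a] by simp,
      List.cons_lt_cons_iff] at hlt
  rcases hlt with h1 | ⟨h1, h2⟩
  · exact absurd h (not_le.mpr h1)
  · exact absurd h2 (lt_irrefl _)

-- the heart: sorting a bucket of singleton strings = filtering the sorted character list
theorem pv_sorted_filter_map (p : Char → Bool) (cs : List Char) :
    PySem.List.sorted ((cs.filter p).map pvToStr) (fun x => x) false =
      ((PySem.List.sorted cs (fun x => x) false).filter p).map pvToStr := by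
  apply PySem.List.sorted_id_eq_of_perm_of_pairwise
  · exact ((PySem.List.sorted_perm cs (fun x => x) false).filter p).map pvToStr
  · have hp : (PySem.List.sorted cs (fun x => x) false).Pairwise (fun a b => a ≤ b) :=
      PySem.List.sorted_pairwise cs (fun x => x)
    exact (hp.filter p).map pvToStr (fun a b hab => pvToStr_mono a b hab)

-- ===== VERDICT (by name: the statement is the Claim_ definition above) =====
theorem create_lists_and_sort_spec : Claim_equal_create_lists_and_sort := by
  intro s _
  show create_lists_and_sort s = create_lists_and_sort_alt s
  simp only [create_lists_and_sort, create_lists_and_sort_alt]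
  rw [show (fun (acc : List String × List String × List String × List String) i =>
      let c := PySem.List.pyGetD s.toList i ' '
      if PySem.Chars.islower c then
        (acc.1 ++ [String.ofList [c]], acc.2.1, acc.2.2.1, acc.2.2.2)
      else if PySem.Chars.isupper c then
        (acc.1, acc.2.1 ++ [String.ofList [c]], acc.2.2.1, acc.2.2.2)
      else if c ∈ (['1', '2', '3', '4', '5', '6', '7', '8', '9', '0'] : List Char) then
        (if PySem.Int.mod ((PySem.Int.ofChars? [c]).getD 0) 2 == 0 then
          (acc.1, acc.2.1, acc.2.2.1, acc.2.2.2 ++ [String.ofList [c]])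
        else
          (acc.1, acc.2.1, acc.2.2.1 ++ [String.ofList [c]], acc.2.2.2))
      else acc) = (fun acc i => pvStep pvNums acc (PySem.List.pyGetD s.toList i ' ')) from rfl]
  rw [PySem.List.foldl_pyRange_pyGetD s.toList ' ' (pvStep pvNums) ([], [], [], []) (le_refl 0)]
  simp only [Int.toNat_zero, List.drop_zero]
  rw [pvStep_foldl]
  simp only [List.nil_append]
  rw [pv_sorted_filter_map, pv_sorted_filter_map, pv_sorted_filter_map, pv_sorted_filter_map]
  rfl
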